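-- pv_equiv track=rewrite | github.com/sdehoog/AoC_2021 | Day 10/AoC_Day_10 - Copy.py | line_score
-- ===== SOURCE A (Python) =====
-- def line_score(line):
--     score = 0
--     score_dict = {
--         '(': 1,
--         '[': 2,
--         '{': 3,
--         '<': 4}
--     for char in line:
--         score = score * 5 + score_dict[char]
--
--     return score
-- ===== SOURCE B (Python) =====
-- def line_score(line):
--     score_dict = {
--         '(': 1,
--         '[': 2,
--         '{': 3,
--         '<': 4}
--     total = 0
--     power = 1
--     for char in reversed(line):
--         total += score_dict[char] * power
--         power *= 5
--     return total
-- ===== Notes on version B (the rewrite author's own statement) =====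
-- stated objective: alternative
-- what changed: Replaces the left-to-right Horner accumulation with a right-to-left pass that maintains an explicit positional weight (power of 5) and a running sum.
import Mathlib
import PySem

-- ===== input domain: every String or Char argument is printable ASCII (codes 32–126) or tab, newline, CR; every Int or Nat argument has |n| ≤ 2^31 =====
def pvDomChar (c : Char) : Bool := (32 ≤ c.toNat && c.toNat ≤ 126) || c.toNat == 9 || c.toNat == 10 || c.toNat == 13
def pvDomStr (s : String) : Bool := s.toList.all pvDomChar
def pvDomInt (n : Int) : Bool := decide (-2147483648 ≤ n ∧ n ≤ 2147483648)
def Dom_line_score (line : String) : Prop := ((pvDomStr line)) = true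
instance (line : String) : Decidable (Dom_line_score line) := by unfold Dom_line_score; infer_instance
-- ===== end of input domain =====

-- B re-implements the base-5 score right-to-left with an explicit positional weight instead of A's Horner fold; same cost, different decomposition.
-- Pre_ excludes lines containing a character outside '([{<' — there Python A raises KeyError (and B raises too).

-- ===== PORT A =====
-- the score_dict literal of both Pythons, as a lookup; Pre_ restricts to its keys,
-- so the `0` default is never reached on admitted inputs (Python raises KeyError there)
def scoreDict : PySem.Dict Char Int :=
  (((PySem.Dict.empty.insert '(' 1).insert '[' 2).insert '{' 3).insert '<' 4

def line_score (line : String) : Int :=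
  line.toList.foldl (fun score char => score * 5 + scoreDict.getD char 0) 0

-- ===== PORT B =====
def line_score_alt (line : String) : Int :=
  (line.toList.reverse.foldl
      (fun (tp : Int × Int) char => (tp.1 + scoreDict.getD char 0 * tp.2, tp.2 * 5))
      (0, 1)).1

-- ===== PRECONDITION & SPEC =====
def Pre_line_score (line : String) : Prop :=
  (line.toList.all fun c => c == '(' || c == '[' || c == '{' || c == '<') = true
instance (line : String) : Decidable (Pre_line_score line) := by unfold Pre_line_score; infer_instance
def pvWitness_line_score : String := "(<"
def Spec_line_score (line : String) (out : Int) : Prop := out = line_score_alt line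
instance (line : String) (out : Int) : Decidable (Spec_line_score line out) := by unfold Spec_line_score; infer_instance

-- ===== CLAIM (what is proved, stated in full; the proofs are below) =====
def Claim_equal_line_score : Prop := ∀ (line : String), Dom_line_score line → Pre_line_score line → Spec_line_score line (line_score line)

-- ===== LEMMAS AND PROOFS =====

-- value of a digit list, least-significant digit first
def lsbVal (l : List Char) : Int :=
  l.foldr (fun c acc => scoreDict.getD c 0 + 5 * acc) 0

theorem lsbVal_append_singleton (xs : List Char) (c : Char) :
    lsbVal (xs ++ [c]) = lsbVal xs + scoreDict.getD c 0 * 5 ^ xs.length := by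
  induction xs with
  | nil => simp [lsbVal]
  | cons x xs ih =>
      simp only [lsbVal, List.cons_append, List.foldr_cons, List.length_cons] at ih ⊢
      rw [ih]; ring

theorem alt_loop (m : List Char) (t p : Int) :
    m.foldl (fun (tp : Int × Int) c => (tp.1 + scoreDict.getD c 0 * tp.2, tp.2 * 5)) (t, p)
      = (t + p * lsbVal m, p * 5 ^ m.length) := by
  induction m generalizing t p with
  | nil => simp [lsbVal]
  | cons c rest ih =>
      simp only [List.foldl_cons, List.length_cons, lsbVal, List.foldr_cons] at ih ⊢
      rw [ih]; exact Prod.ext (by ring) (by ring)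

theorem horner_loop (l : List Char) (s : Int) :
    l.foldl (fun score c => score * 5 + scoreDict.getD c 0) s
      = s * 5 ^ l.length + lsbVal l.reverse := by
  induction l generalizing s with
  | nil => simp [lsbVal]
  | cons c rest ih =>
      simp only [List.foldl, List.reverse_cons, List.length_cons]
      rw [ih, lsbVal_append_singleton]
      simp [pow_succ]; ring

-- ===== VERDICT (by name: the statement is the Claim_ definition above) =====
theorem line_score_spec : Claim_equal_line_score := by
  intro line _ _
  unfold Spec_line_score line_score line_score_alt
  rw [horner_loop, alt_loop]
  simp
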